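-- pv_equiv track=rewrite | github.com/Roddek-Dev/python_validacion | organizador_documentos.py | _determine_reason
-- ===== SOURCE A (Python) =====
-- from typing import Dict, List, Tuple, Optional, Set
--
-- def _determine_reason(score: int, found_keywords: List[str]) -> str:
--     """
--     Determina la razón de la clasificación basada en la puntuación y palabras clave.
--
--     Args:
--         score: Puntuación total
--         found_keywords: Lista de palabras clave encontradas
--
--     Returns:
--         Razón de la clasificación
--     """
--     if any(kw.startswith("folder:") for kw in found_keywords):
--         return "carpeta_padre"
--     elif any(kw.startswith("content:") for kw in found_keywords):
--         return "contenido"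
--     elif any(kw.startswith("ocr:") for kw in found_keywords):
--         return "ocr"
--     else:
--         return "nombre_archivo"
-- ===== SOURCE B (Python) =====
-- def _determine_reason(score, found_keywords):
--     """One pass: collect which target prefixes occur, then consult a priority table."""
--     prefixes = ("folder:", "content:", "ocr:")
--     present = set()
--     for kw in found_keywords:
--         for p in prefixes:
--             if kw.startswith(p):
--                 present.add(p)
--     for p, reason in (("folder:", "carpeta_padre"),
--                       ("content:", "contenido"),
--                       ("ocr:", "ocr")):
--         if p in present:
--             return reason
--     return "nombre_archivo"
-- ===== Notes on version B (the rewrite author's own statement) =====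
-- stated objective: alternative
-- what changed: Replaces A's up-to-three repeated any()-scans of the list with a single pass that builds a set of occurring prefixes, then a table-driven priority lookup.
import Mathlib
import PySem

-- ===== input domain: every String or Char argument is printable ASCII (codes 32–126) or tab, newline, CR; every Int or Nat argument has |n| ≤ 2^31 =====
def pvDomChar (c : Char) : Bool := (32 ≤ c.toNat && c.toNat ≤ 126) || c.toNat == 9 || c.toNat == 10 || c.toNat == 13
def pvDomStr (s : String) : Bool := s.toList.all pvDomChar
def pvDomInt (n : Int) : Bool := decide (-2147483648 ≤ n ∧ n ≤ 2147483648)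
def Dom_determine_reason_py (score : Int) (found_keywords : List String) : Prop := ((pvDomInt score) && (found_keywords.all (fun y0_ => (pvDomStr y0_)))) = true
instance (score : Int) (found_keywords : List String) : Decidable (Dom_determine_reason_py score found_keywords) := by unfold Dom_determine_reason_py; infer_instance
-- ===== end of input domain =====

-- B replaces A's up-to-three repeated any()-scans by one pass that collects the occurring
-- prefixes into a set, then a table-driven priority lookup (objective: alternative).

-- ===== PORT A =====
def determine_reason_py (score : Int) (found_keywords : List String) : String :=
  if found_keywords.any (fun kw => PySem.Str.startswith kw "folder:") then "carpeta_padre"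
  else if found_keywords.any (fun kw => PySem.Str.startswith kw "content:") then "contenido"
  else if found_keywords.any (fun kw => PySem.Str.startswith kw "ocr:") then "ocr"
  else "nombre_archivo"

-- ===== PORT B =====
def pvPrefixes : List String := ["folder:", "content:", "ocr:"]

def pvTable : List (String × String) :=
  [("folder:", "carpeta_padre"), ("content:", "contenido"), ("ocr:", "ocr")]

def determine_reason_py_alt (score : Int) (found_keywords : List String) : String :=
  let present : PySem.Set String :=
    found_keywords.foldl
      (fun s kw =>
        pvPrefixes.foldl (fun s p => if PySem.Str.startswith kw p then PySem.Set.add s p else s) s)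
      PySem.Set.empty
  match pvTable.find? (fun pr => PySem.Set.contains present pr.1) with
  | some pr => pr.2
  | none => "nombre_archivo"

-- ===== PRECONDITION & SPEC =====
def Spec_determine_reason_py (score : Int) (found_keywords : List String) (out : String) : Prop := out = determine_reason_py_alt score found_keywords
instance (score : Int) (found_keywords : List String) (out : String) : Decidable (Spec_determine_reason_py score found_keywords out) := by unfold Spec_determine_reason_py; infer_instance

-- ===== CLAIM (what is proved, stated in full; the proofs are below) =====
def Claim_equal_determine_reason_py : Prop := ∀ (score : Int) (found_keywords : List String), Dom_determine_reason_py score found_keywords → Spec_determine_reason_py score found_keywords (determine_reason_py score found_keywords)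

-- ===== LEMMAS AND PROOFS =====

-- adding q to a set: p is a member afterwards iff it was, or p = q
lemma contains_add (s : PySem.Set String) (p q : String) :
    PySem.Set.contains (PySem.Set.add s q) p = (PySem.Set.contains s p || p == q) := by
  by_cases hpq : p = q <;>
    simp_all [PySem.Set.add, PySem.Set.contains] <;> split_ifs <;> simp_all

-- one inner pass over the three prefixes: membership of a prefix p in the set after
-- processing kw is its previous membership or'ed with kw.startswith(p)
lemma contains_inner (kw : String) (s : PySem.Set String) (p : String) (hp : p ∈ pvPrefixes) :
    PySem.Set.contains
      (pvPrefixes.foldl (fun s q => if PySem.Str.startswith kw q then PySem.Set.add s q else s) s) p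
    = (PySem.Set.contains s p || PySem.Str.startswith kw p) := by
  simp only [pvPrefixes, List.mem_cons, List.not_mem_nil, or_false] at hp
  rcases hp with rfl | rfl | rfl <;>
    · simp only [pvPrefixes, List.foldl_cons, List.foldl_nil]
      split_ifs <;> simp_all [contains_add]

-- the whole pass: p is in the accumulated set iff it was already, or some keyword starts with p
lemma contains_fold (xs : List String) (s : PySem.Set String) (p : String) (hp : p ∈ pvPrefixes) :
    PySem.Set.contains
      (xs.foldl
        (fun s kw =>
          pvPrefixes.foldl (fun s q => if PySem.Str.startswith kw q then PySem.Set.add s q else s) s)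
        s) p
    = (PySem.Set.contains s p || xs.any (fun kw => PySem.Str.startswith kw p)) := by
  induction xs generalizing s with
  | nil => simp
  | cons kw rest ih =>
    simp only [List.foldl_cons, List.any_cons, ih, contains_inner kw s p hp, Bool.or_assoc]

-- ===== VERDICT (by name: the statement is the Claim_ definition above) =====
theorem determine_reason_py_spec : Claim_equal_determine_reason_py := by
  intro score xs _
  unfold Spec_determine_reason_py determine_reason_py determine_reason_py_alt
  simp only [pvTable, List.find?]
  rw [contains_fold xs PySem.Set.empty "folder:" (by decide),
      contains_fold xs PySem.Set.empty "content:" (by decide),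
      contains_fold xs PySem.Set.empty "ocr:" (by decide)]
  simp only [PySem.Set.empty, PySem.Set.contains, List.contains_nil, Bool.false_or]
  cases h1 : xs.any (fun kw => PySem.Str.startswith kw "folder:") <;>
    cases h2 : xs.any (fun kw => PySem.Str.startswith kw "content:") <;>
      cases h3 : xs.any (fun kw => PySem.Str.startswith kw "ocr:") <;>
        simp only [h1, h2, h3, Bool.false_eq_true, reduceIte]
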